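-- pv_equiv track=rewrite | github.com/mustafcode10/VeroSkills | Python/Problems/main.py | max_min_word_length
-- ===== SOURCE A (Python) =====
-- def max_min_word_length(sentence):
--     words = sentence.split()
--     max_length = len(words[0])
--     min_length = len(words[0])
--     for word in words[1:]:
--         word_length = len(word)
--         if word_length > max_length:
--             max_length = word_length
--         elif word_length < min_length:
--             min_length = word_length
--     return max_length, min_length
-- ===== SOURCE B (Python) =====
-- def max_min_word_length(sentence):
--     lengths = sorted(len(w) for w in sentence.split())
--     return lengths[-1], lengths[0]
-- ===== Notes on version B (the rewrite author's own statement) =====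
-- stated objective: simpler
-- what changed: Replaces the manual single-pass max/min tracking loop with sorting the list of word lengths and picking its two ends; an empty sentence still raises IndexError (excluded by Pre_).
import Mathlib
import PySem

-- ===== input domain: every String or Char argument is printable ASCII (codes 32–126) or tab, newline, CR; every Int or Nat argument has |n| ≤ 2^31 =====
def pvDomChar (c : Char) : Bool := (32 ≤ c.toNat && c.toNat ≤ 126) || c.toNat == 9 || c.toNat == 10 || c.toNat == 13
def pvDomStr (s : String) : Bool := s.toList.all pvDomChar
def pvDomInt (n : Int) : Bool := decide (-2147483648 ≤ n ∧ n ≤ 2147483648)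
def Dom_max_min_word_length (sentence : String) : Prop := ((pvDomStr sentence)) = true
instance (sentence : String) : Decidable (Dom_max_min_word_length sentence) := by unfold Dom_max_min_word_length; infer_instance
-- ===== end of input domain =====

-- B replaces A's manual single-pass max/min tracking loop by sorting the word lengths and
-- taking the two ends of the sorted list (objective: simpler; not faster).


-- ===== PORT A =====
-- the body of A's loop: update max, elif update min
def pvStepA (st : Int × Int) (wl : Int) : Int × Int :=
  if wl > st.1 then (wl, st.2) else if wl < st.2 then (st.1, wl) else st

def max_min_word_length (sentence : String) : Int × Int :=
  let words := PySem.Str.split₀ sentence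
  match words with
  | [] => (0, 0)   -- words[0] raises IndexError here; excluded by Pre_
  | w0 :: _ =>
    let init : Int × Int := (PySem.Str.len w0, PySem.Str.len w0)
    (PySem.List.slice words (some 1)).foldl
      (fun st word => pvStepA st (PySem.Str.len word)) init

-- ===== PORT B =====
def max_min_word_length_alt (sentence : String) : Int × Int :=
  let lengths := PySem.List.sorted ((PySem.Str.split₀ sentence).map PySem.Str.len) (fun x => x)
  match PySem.List.pyGet? lengths (-1), PySem.List.pyGet? lengths 0 with
  | some a, some b => (a, b)
  | _, _ => (0, 0)   -- lengths[-1] raises IndexError here; excluded by Pre_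

-- ===== PRECONDITION & SPEC =====
-- A (via words[0]) and B (via lengths[-1]) both raise IndexError when the sentence has no words.
def Pre_max_min_word_length (sentence : String) : Prop := PySem.Str.split₀ sentence ≠ []
instance (sentence : String) : Decidable (Pre_max_min_word_length sentence) := by
  unfold Pre_max_min_word_length; infer_instance
def pvWitness_max_min_word_length : String := "hello to the world"

def Spec_max_min_word_length (sentence : String) (out : Int × Int) : Prop := out = max_min_word_length_alt sentence
instance (sentence : String) (out : Int × Int) : Decidable (Spec_max_min_word_length sentence out) := by unfold Spec_max_min_word_length; infer_instance

-- ===== CLAIM (what is proved, stated in full; the proofs are below) =====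
def Claim_equal_max_min_word_length : Prop := ∀ (sentence : String), Dom_max_min_word_length sentence → Pre_max_min_word_length sentence → Spec_max_min_word_length sentence (max_min_word_length sentence)

-- ===== LEMMAS AND PROOFS =====

-- A's loop computes the running max and min of the lengths it sees.
theorem foldl_pvStepA (t : List Int) (mx mn : Int) (h : mn ≤ mx) :
    t.foldl pvStepA (mx, mn) = (t.foldl max mx, t.foldl min mn) := by
  induction t generalizing mx mn with
  | nil => rfl
  | cons w t ih =>
    simp only [List.foldl_cons, pvStepA]
    split_ifs with h1 h2
    · rw [ih w mn (by omega)]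
      rw [max_eq_right (by omega), min_eq_left (by omega)]
    · rw [ih mx w (by omega)]
      rw [max_eq_left (by omega), min_eq_right (by omega)]
    · rw [ih mx mn h]
      rw [max_eq_left (by omega), min_eq_left (by omega)]

-- in a ≤-sorted list every element is at most the last one
theorem mem_le_getLast {l : List Int} (hp : l.Pairwise (· ≤ ·)) {y : Int} (hy : y ∈ l)
    (h : l ≠ []) : y ≤ l.getLast h := by
  induction l with
  | nil => cases hy
  | cons a t ih =>
    rcases List.pairwise_cons.1 hp with ⟨ha, hpt⟩
    cases t with
    | nil => simp_all
    | cons b u =>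
      rw [List.getLast_cons (by simp)]
      rcases List.mem_cons.1 hy with rfl | hyt
      · exact le_trans (ha _ (List.getLast_mem _)) (le_refl _)
      · exact ih hpt hyt (by simp)

theorem max_min_word_length_eq (sentence : String)
    (hpre : Pre_max_min_word_length sentence) :
    max_min_word_length sentence = max_min_word_length_alt sentence := by
  unfold Pre_max_min_word_length at hpre
  obtain ⟨w0, rest, hw⟩ : ∃ w0 rest, PySem.Str.split₀ sentence = w0 :: rest := by
    cases h : PySem.Str.split₀ sentence with
    | nil => exact absurd h hpre
    | cons a t => exact ⟨a, t, rfl⟩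
  -- name the data
  set l0 := PySem.Str.len w0 with hl0
  set ls := rest.map PySem.Str.len with hls
  -- A's value
  have hA : max_min_word_length sentence = (ls.foldl max l0, ls.foldl min l0) := by
    unfold max_min_word_length
    rw [hw]
    simp only [PySem.List.slice_from_one, List.tail_cons]
    rw [← foldl_pvStepA ls l0 l0 (le_refl _), hls, List.foldl_map]
  -- B's value: sorted list is nonempty
  set s := PySem.List.sorted (l0 :: ls) (fun x => x) false with hs
  obtain ⟨m, t, hst⟩ : ∃ m t, s = m :: t := by
    cases h : s with
    | nil =>
      have := (PySem.List.sorted_eq_nil_iff _ _ _).1 (hs ▸ h)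
      simp at this
    | cons a t => exact ⟨a, t, rfl⟩
  have hB : max_min_word_length_alt sentence = ((m :: t).getLast (by simp), m) := by
    unfold max_min_word_length_alt
    rw [hw]
    simp only [List.map_cons, ← hls, ← hl0, ← hs, hst]
    rw [PySem.List.pyGet?_neg_one, PySem.List.pyGet?_zero]
    simp [List.getLast?_eq_some_getLast]
  rw [hA, hB]
  simp only [Prod.mk.injEq]
  -- membership transfer between s and l0 :: ls
  have hmem : ∀ y : Int, y ∈ m :: t ↔ y ∈ l0 :: ls := by
    intro y
    rw [← hst, hs]
    exact PySem.List.mem_sorted _ _ _ _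
  have hpair : (m :: t).Pairwise (fun a b : Int => a ≤ b) := by
    rw [← hst, hs]
    exact PySem.List.sorted_pairwise _ _
  constructor
  · -- last of sorted = foldl max
    have hfmax_mem : ls.foldl max l0 ∈ m :: t := by
      rw [hmem]
      rcases PySem.List.foldl_max_mem ls l0 with h | h
      · rw [h]; exact List.mem_cons_self
      · exact List.mem_cons_of_mem _ h
    have h1 : ls.foldl max l0 ≤ (m :: t).getLast (by simp) :=
      mem_le_getLast hpair hfmax_mem (by simp)
    have h2 : (m :: t).getLast (by simp) ≤ ls.foldl max l0 := by
      have hmem' : (m :: t).getLast (by simp) ∈ l0 :: ls :=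
        (hmem _).1 (List.getLast_mem _)
      rcases List.mem_cons.1 hmem' with h | h
      · rw [h]; exact (PySem.List.le_foldl_max ls l0).1
      · exact (PySem.List.le_foldl_max ls l0).2 _ h
    omega
  · -- head of sorted = foldl min
    have hfmin_mem : ls.foldl min l0 ∈ m :: t := by
      rw [hmem]
      rcases PySem.List.foldl_min_mem ls l0 with h | h
      · rw [h]; exact List.mem_cons_self
      · exact List.mem_cons_of_mem _ h
    have h1 : m ≤ ls.foldl min l0 := by
      have hsmt : PySem.List.sorted (l0 :: ls) (fun x : Int => x) false = m :: t := by
        rw [← hs, hst]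
      exact PySem.List.key_head_sorted_le _ _ hsmt _ ((hmem _).1 hfmin_mem)
    have h2 : ls.foldl min l0 ≤ m := by
      have hm : m ∈ l0 :: ls := (hmem _).1 List.mem_cons_self
      rcases List.mem_cons.1 hm with h | h
      · rw [h]; exact (PySem.List.foldl_min_le ls l0).1
      · exact (PySem.List.foldl_min_le ls l0).2 _ h
    omega

-- ===== VERDICT (by name: the statement is the Claim_ definition above) =====
theorem max_min_word_length_spec : Claim_equal_max_min_word_length := by
  intro sentence _ hpre
  unfold Spec_max_min_word_length
  exact max_min_word_length_eq sentence hpre
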